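-- pv_equiv track=rewrite | github.com/safarivis/eva_railway | integrations/conversation_revival.py | _extract_key_moment
-- ===== SOURCE A (Python) =====
-- def _extract_key_moment(content: str) -> str:
--     """Extract the key moment from the conversation content"""
--     lines = content.split('\n')
--
--     # Look for interesting parts
--     for line in lines:
--         if any(word in line.lower() for word in ['haha', 'funny', 'fixed', 'works', 'brilliant', 'genius']):
--             # Clean up the line
--             clean_line = line.replace('User: ', '').replace('EVA: ', '').strip()
--             if len(clean_line) > 100:
--                 clean_line = clean_line[:97] + "..."
--             return clean_line
--
--     # Fallback to first non-empty line
--     for line in lines: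
--         clean_line = line.replace('User: ', '').replace('EVA: ', '').strip()
--         if clean_line and len(clean_line) > 10:
--             if len(clean_line) > 80:
--                 clean_line = clean_line[:77] + "..."
--             return clean_line
--
--     return "something interesting"
-- ===== SOURCE B (Python) =====
-- def _extract_key_moment(content: str) -> str:
--     """Extract the key moment: backward fold with a tagged (priority, text) accumulator."""
--     KEYWORDS = ('haha', 'funny', 'fixed', 'works', 'brilliant', 'genius')
--
--     def _clean(line):
--         return line.replace('User: ', '').replace('EVA: ', '').strip()
--
--     def _trunc(text, limit, cut):
--         return text[:cut] + '...' if len(text) > limit else text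
--
--     # priority 2 = keyword hit, 1 = fallback candidate, 0 = default;
--     # scanning back-to-front, an earlier line of >= priority overwrites a later one.
--     acc = (0, 'something interesting')
--     for line in reversed(content.split('\n')):
--         low = line.lower()
--         if any(w in low for w in KEYWORDS):
--             acc = (2, _trunc(_clean(line), 100, 97))
--         elif acc[0] < 2:
--             c = _clean(line)
--             if len(c) > 10:
--                 acc = (1, _trunc(c, 80, 77))
--     return acc[1]
-- ===== Notes on version B (the rewrite author's own statement) =====
-- stated objective: alternative
-- what changed: Replaced A's two forward early-return passes by a single backward fold over the lines with a tagged (priority, text) accumulator (keyword hit > fallback candidate > default), where an earlier line of equal-or-higher priority overwrites a later one; keyword lines lower the line once instead of once per keyword, and both truncations share one helper.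
import Mathlib
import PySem

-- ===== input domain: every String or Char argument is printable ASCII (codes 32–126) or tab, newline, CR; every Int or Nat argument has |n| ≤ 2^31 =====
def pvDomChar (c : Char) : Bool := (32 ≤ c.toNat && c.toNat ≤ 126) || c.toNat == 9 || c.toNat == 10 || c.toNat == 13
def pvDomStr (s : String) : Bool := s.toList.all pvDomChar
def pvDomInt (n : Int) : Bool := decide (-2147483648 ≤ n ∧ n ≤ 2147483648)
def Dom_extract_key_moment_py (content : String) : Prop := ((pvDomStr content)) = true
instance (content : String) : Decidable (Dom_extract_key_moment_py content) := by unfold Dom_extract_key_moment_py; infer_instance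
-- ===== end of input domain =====

-- B replaces A's two forward early-return passes by a single backward fold with a tagged
-- (priority, text) accumulator (objective: alternative).

-- ===== PORT A =====
def pvCleanA (line : List Char) : List Char :=
  PySem.Chars.strip (PySem.Chars.replace (PySem.Chars.replace line "User: ".toList []) "EVA: ".toList [])

def pvHasKwA (line : List Char) : Bool :=
  (["haha", "funny", "fixed", "works", "brilliant", "genius"].map String.toList).any
    (fun w => PySem.Chars.isIn w (PySem.Chars.lower line))

-- first loop: first keyword line, cleaned and truncated at 100 → 97 + "..."
def pvLoop1A : List (List Char) → Option (List Char)
  | [] => none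
  | l :: ls =>
    if pvHasKwA l then
      let c := pvCleanA l
      some (if 100 < c.length then PySem.List.slice c none (some 97) ++ "...".toList else c)
    else pvLoop1A ls

-- second loop: first non-empty cleaned line of length > 10, truncated at 80 → 77 + "..."
def pvLoop2A : List (List Char) → Option (List Char)
  | [] => none
  | l :: ls =>
    let c := pvCleanA l
    if c ≠ [] ∧ 10 < c.length then
      some (if 80 < c.length then PySem.List.slice c none (some 77) ++ "...".toList else c)
    else pvLoop2A ls

def extract_key_moment_py (content : String) : String :=
  let lines := PySem.Chars.splitOn content.toList ['\n']
  match pvLoop1A lines with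
  | some r => String.ofList r
  | none =>
    match pvLoop2A lines with
    | some r => String.ofList r
    | none => "something interesting"

-- ===== PORT B =====
-- shared truncation helper: text[:cut] + '...' if len(text) > limit else text
def pvTruncB (text : List Char) (limit : Nat) (cut : Int) : List Char :=
  if limit < text.length then PySem.List.slice text none (some cut) ++ "...".toList else text

def pvCleanLineB (line : List Char) : List Char :=
  PySem.Chars.strip (PySem.Chars.replace (PySem.Chars.replace line "User: ".toList []) "EVA: ".toList [])

-- one fold step, applied back-to-front: priority 2 = keyword hit, 1 = fallback, 0 = default;
-- an earlier line of equal-or-higher priority overwrites a later one.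
def pvStepB (acc : Nat × List Char) (line : List Char) : Nat × List Char :=
  let low := PySem.Chars.lower line
  if (["haha", "funny", "fixed", "works", "brilliant", "genius"].map String.toList).any
      (fun w => PySem.Chars.isIn w low) then
    (2, pvTruncB (pvCleanLineB line) 100 97)
  else if acc.1 < 2 then
    let c := pvCleanLineB line
    if 10 < c.length then (1, pvTruncB c 80 77) else acc
  else acc

def extract_key_moment_py_alt (content : String) : String :=
  String.ofList
    (((PySem.Chars.splitOn content.toList ['\n']).reverse.foldl pvStepB
        (0, "something interesting".toList)).2)

-- ===== PRECONDITION & SPEC =====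
def Spec_extract_key_moment_py (content : String) (out : String) : Prop := out = extract_key_moment_py_alt content
instance (content : String) (out : String) : Decidable (Spec_extract_key_moment_py content out) := by unfold Spec_extract_key_moment_py; infer_instance

-- ===== CLAIM (what is proved, stated in full; the proofs are below) =====
def Claim_equal_extract_key_moment_py : Prop := ∀ (content : String), Dom_extract_key_moment_py content → Spec_extract_key_moment_py content (extract_key_moment_py content)

-- ===== LEMMAS AND PROOFS =====

-- what A computes from a list of lines, as one tagged value
def pvModelA (ls : List (List Char)) : Nat × List Char :=
  match pvLoop1A ls with
  | some v => (2, v)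
  | none =>
    match pvLoop2A ls with
    | some v => (1, v)
    | none => (0, "something interesting".toList)

theorem pvStepB_kw (acc : Nat × List Char) (l : List Char) (h : pvHasKwA l = true) :
    pvStepB acc l = (2, pvTruncB (pvCleanA l) 100 97) := by
  have : (["haha", "funny", "fixed", "works", "brilliant", "genius"].map String.toList).any
      (fun w => PySem.Chars.isIn w (PySem.Chars.lower l)) = true := h
  simp only [pvStepB, this, if_true]
  simp [pvCleanLineB, pvCleanA]

theorem pvStepB_not_kw (acc : Nat × List Char) (l : List Char) (h : pvHasKwA l = false) :
    pvStepB acc l =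
      if acc.1 < 2 then
        (if 10 < (pvCleanA l).length then (1, pvTruncB (pvCleanA l) 80 77) else acc)
      else acc := by
  have : (["haha", "funny", "fixed", "works", "brilliant", "genius"].map String.toList).any
      (fun w => PySem.Chars.isIn w (PySem.Chars.lower l)) = false := h
  simp only [pvStepB, this, Bool.false_eq_true, if_false]
  simp [pvCleanLineB, pvCleanA]

-- the backward fold computes exactly A's tagged value
theorem pvFold_eq_model (ls : List (List Char)) :
    ls.reverse.foldl pvStepB (0, "something interesting".toList) = pvModelA ls := by
  rw [List.foldl_reverse]
  induction ls with
  | nil => simp [pvModelA, pvLoop1A, pvLoop2A]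
  | cons l ls ih =>
    simp only [List.foldr_cons, ih]
    by_cases hk : pvHasKwA l
    · rw [pvStepB_kw _ _ hk]
      simp [pvModelA, pvLoop1A, hk, pvTruncB]
    · rw [pvStepB_not_kw _ _ (by simpa using hk)]
      have h1 : pvLoop1A (l :: ls) = pvLoop1A ls := by simp [pvLoop1A, hk]
      by_cases hc : 10 < (pvCleanA l).length
      · have hne : pvCleanA l ≠ [] := by
          intro h; rw [h] at hc; simp at hc
        have h2 : pvLoop2A (l :: ls) =
            some (if 80 < (pvCleanA l).length then
              PySem.List.slice (pvCleanA l) none (some 77) ++ "...".toList else pvCleanA l) := by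
          simp [pvLoop2A, hne, hc]
        cases hl1 : pvLoop1A ls with
        | some v => simp [pvModelA, h1, hl1]
        | none =>
          cases hl2 : pvLoop2A ls with
          | some v => simp [pvModelA, h1, hl1, hl2, h2, hc, pvTruncB]
          | none => simp [pvModelA, h1, hl1, hl2, h2, hc, pvTruncB]
      · have h2 : pvLoop2A (l :: ls) = pvLoop2A ls := by
          simp [pvLoop2A, hc]
        cases hl1 : pvLoop1A ls with
        | some v => simp [pvModelA, h1, hl1]
        | none =>
          cases hl2 : pvLoop2A ls with
          | some v => simp [pvModelA, h1, hl1, hl2, h2, hc]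
          | none => simp [pvModelA, h1, hl1, hl2, h2, hc]

-- ===== VERDICT (by name: the statement is the Claim_ definition above) =====
theorem extract_key_moment_py_spec : Claim_equal_extract_key_moment_py := by
  intro content _
  unfold Spec_extract_key_moment_py extract_key_moment_py extract_key_moment_py_alt
  rw [pvFold_eq_model]
  dsimp only
  cases h1 : pvLoop1A (PySem.Chars.splitOn content.toList ['\n']) with
  | some r => simp [pvModelA, h1]
  | none =>
    cases h2 : pvLoop2A (PySem.Chars.splitOn content.toList ['\n']) with
    | some r => simp [pvModelA, h1, h2]
    | none => simp [pvModelA, h1, h2]
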